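-- pv_equiv track=rewrite | github.com/camazlucas/Fine-Tuning-BART-Feat-Paths | Pre-processamento/Paths_Extraction/multi_extraction.py | find_shortest_distance
-- ===== SOURCE A (Python) =====
-- from collections import deque
--
-- def find_shortest_distance(graph, start, target, max_hops=3):
--     queue = deque([(start, 0)])
--     visited = set([start])
--
--     while queue:
--         node, dist = queue.popleft()
--
--         if node == target:
--             return dist
--
--         if dist >= max_hops:
--             continue
--
--         for _, neighbor in graph.get(node, []):
--             if neighbor not in visited:
--                 visited.add(neighbor)
--                 queue.append((neighbor, dist + 1))
--
--     return None
-- ===== SOURCE B (Python) =====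
-- def find_shortest_distance(graph, start, target, max_hops=3):
--     frontier = [start]
--     visited = {start}
--     for dist in range(max(max_hops, 0) + 1):
--         if target in frontier:
--             return dist
--         next_frontier = []
--         for node in frontier:
--             for _, neighbor in graph.get(node, []):
--                 if neighbor not in visited:
--                     visited.add(neighbor)
--                     next_frontier.append(neighbor)
--         frontier = next_frontier
--         if not frontier:
--             return None
--     return None
-- ===== Notes on version B (the rewrite author's own statement) =====
-- stated objective: alternative
-- what changed: Replaces the single distance-tagged deque loop by a level-synchronous BFS: an outer bounded hop loop checks the target against the whole current frontier and then expands it into the next frontier, so no (node, dist) pairs are ever queued.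
import Mathlib
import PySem

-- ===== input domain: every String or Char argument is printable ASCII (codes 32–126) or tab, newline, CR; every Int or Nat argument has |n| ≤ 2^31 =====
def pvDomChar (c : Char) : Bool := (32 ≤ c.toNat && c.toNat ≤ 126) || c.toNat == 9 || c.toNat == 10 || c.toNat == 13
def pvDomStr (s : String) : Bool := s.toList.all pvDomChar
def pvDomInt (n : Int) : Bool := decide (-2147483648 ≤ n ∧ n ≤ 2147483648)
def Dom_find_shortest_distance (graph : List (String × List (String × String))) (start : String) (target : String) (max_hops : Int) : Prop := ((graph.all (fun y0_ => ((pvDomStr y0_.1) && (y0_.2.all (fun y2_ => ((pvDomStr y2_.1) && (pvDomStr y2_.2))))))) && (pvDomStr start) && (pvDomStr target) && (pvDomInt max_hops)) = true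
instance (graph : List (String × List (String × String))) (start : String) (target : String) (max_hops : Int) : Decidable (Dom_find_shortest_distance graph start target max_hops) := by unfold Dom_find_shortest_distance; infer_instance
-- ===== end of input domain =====

-- B is a level-synchronous BFS (frontier per hop) instead of A's distance-tagged deque; same return value everywhere.

-- ===== PORT A =====
-- all neighbor strings occurring in the graph's value lists (only used for A's termination measure)
def pvNbrs (graph : List (String × List (String × String))) : List String :=
  graph.flatMap (fun p => p.2.map (fun e => e.2))

-- number of graph neighbors not yet visited (A's termination measure component)
def pvUC (graph : List (String × List (String × String))) (v : PySem.Set String) : Nat :=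
  ((pvNbrs graph).filter (fun x => !(PySem.Set.contains v x))).length

-- body of A's inner 'for _, neighbor in graph.get(node, [])' loop
def pvStepA (dist : Int) (acc : PySem.Set String × List (String × Int)) (e : String × String) :
    PySem.Set String × List (String × Int) :=
  if PySem.Set.contains acc.1 e.2 then acc
  else (PySem.Set.add acc.1 e.2, acc.2 ++ [(e.2, dist + 1)])

-- every value getD can return comes from some graph entry
theorem pvGetD_sub (graph : List (String × List (String × String))) (node : String) :
    ∀ e ∈ PySem.Dict.getD (PySem.Dict.mk graph) node [], e.2 ∈ pvNbrs graph := by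
  induction graph with
  | nil =>
    intro e he
    rw [PySem.Dict.getD_eq_get?_getD] at he
    simp [PySem.Dict.get?] at he
  | cons p rest ih =>
    intro e he
    rw [PySem.Dict.getD_eq_get?_getD, PySem.Dict.get?_mk_cons] at he
    by_cases hk : (p.1 == node) = true
    · simp only [hk, if_pos] at he
      simp only [pvNbrs, List.flatMap_cons, List.mem_append, List.mem_map]
      exact Or.inl ⟨e, by simpa using he, rfl⟩
    · simp only [hk, if_neg, Bool.false_eq_true, not_false_iff] at he
      have := ih e (by rw [PySem.Dict.getD_eq_get?_getD]; exact he)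
      simp only [pvNbrs, List.flatMap_cons, List.mem_append] at this ⊢
      exact Or.inr this

-- strict monotonicity of the filtered count at a flipped member
theorem pvFilterLt (p q : String → Bool) (himp : ∀ y, p y = true → q y = true) (x : String) :
    ∀ l : List String, x ∈ l → p x = false → q x = true →
      (l.filter p).length < (l.filter q).length := by
  intro l hx hp hq
  induction l with
  | nil => cases hx
  | cons a t ih =>
    have hle : (t.filter p).length ≤ (t.filter q).length := by
      rw [← List.countP_eq_length_filter, ← List.countP_eq_length_filter]
      exact List.countP_mono_left (fun y _ => himp y)
    rcases List.mem_cons.mp hx with rfl | hxt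
    · simp only [List.filter_cons, hp, hq, Bool.false_eq_true, if_neg, not_false_iff,
        if_pos, List.length_cons]
      omega
    · have h := ih hxt
      cases hpa : p a
      · simp only [List.filter_cons, hpa, Bool.false_eq_true, if_neg, not_false_iff]
        have : (if q a = true then a :: List.filter q t else List.filter q t).length
            ≥ (List.filter q t).length := by
          split <;> simp
        omega
      · simp only [List.filter_cons, hpa, himp a hpa, if_pos, List.length_cons]
        omega

-- visiting a fresh graph neighbor strictly shrinks the unvisited count
theorem pvUC_add_lt (graph : List (String × List (String × String))) (v : PySem.Set String)
    (x : String) (hx : x ∈ pvNbrs graph) (hv : PySem.Set.contains v x = false) :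
    pvUC graph (PySem.Set.add v x) < pvUC graph v := by
  have hadd : PySem.Set.add v x = v ++ [x] := by
    simp only [PySem.Set.add, hv, Bool.false_eq_true, if_neg, not_false_iff]
  unfold pvUC
  refine pvFilterLt (fun y => !(PySem.Set.contains (PySem.Set.add v x) y))
    (fun y => !(PySem.Set.contains v y)) ?_ x (pvNbrs graph) hx ?_ ?_
  · intro y hy
    simp only [hadd, PySem.Set.contains, List.contains_append, Bool.not_eq_true',
      Bool.or_eq_false_iff] at hy
    simp only [PySem.Set.contains, Bool.not_eq_true']
    exact hy.1
  · rw [hadd]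
    simp [PySem.Set.contains]
  · simp [PySem.Set.contains] at hv ⊢
    simpa using hv

-- A's inner loop: appended queue entries are paid for by the unvisited count
theorem pvFoldBound (graph : List (String × List (String × String))) (dist : Int)
    (es : List (String × String)) (hes : ∀ e ∈ es, e.2 ∈ pvNbrs graph) :
    ∀ (v : PySem.Set String) (q : List (String × Int)),
      (es.foldl (pvStepA dist) (v, q)).2.length + pvUC graph (es.foldl (pvStepA dist) (v, q)).1
        ≤ q.length + pvUC graph v := by
  induction es with
  | nil => intro v q; simp
  | cons e t ih =>
    intro v q
    simp only [List.foldl_cons]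
    by_cases h : PySem.Set.contains v e.2 = true
    · simp only [pvStepA, h, if_pos]
      exact ih (fun x hx => hes x (List.mem_cons_of_mem _ hx)) v q
    · simp only [pvStepA, h, Bool.false_eq_true, if_neg, not_false_iff]
      have h1 := ih (fun x hx => hes x (List.mem_cons_of_mem _ hx))
        (PySem.Set.add v e.2) (q ++ [(e.2, dist + 1)])
      have h2 := pvUC_add_lt graph v e.2 (hes e (List.mem_cons_self))
        (Bool.not_eq_true _ ▸ (by simpa using h))
      simp only [List.length_append, List.length_cons, List.length_nil] at h1
      omega

-- A's 'while queue' loop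
def pvLoopA (graph : List (String × List (String × String))) (target : String) (max_hops : Int)
    (queue : List (String × Int)) (visited : PySem.Set String) : Option Int :=
  match queue with
  | [] => none
  | (node, dist) :: rest =>
    if node = target then some dist
    else if max_hops ≤ dist then pvLoopA graph target max_hops rest visited
    else
      let st := (PySem.Dict.getD (PySem.Dict.mk graph) node []).foldl (pvStepA dist) (visited, rest)
      pvLoopA graph target max_hops st.2 st.1
termination_by queue.length + pvUC graph visited
decreasing_by
  · simp
  · have h := pvFoldBound graph dist (PySem.Dict.getD (PySem.Dict.mk graph) node [])
      (pvGetD_sub graph node) visited rest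
    simp only [List.length_cons]
    omega

def find_shortest_distance (graph : List (String × List (String × String))) (start : String)
    (target : String) (max_hops : Int) : Option Int :=
  pvLoopA graph target max_hops [(start, 0)] (PySem.Set.ofList [start])

-- ===== PORT B =====
-- body of B's inner 'for _, neighbor in graph.get(node, [])' loop
def pvStepB (acc : PySem.Set String × List String) (e : String × String) :
    PySem.Set String × List String :=
  if PySem.Set.contains acc.1 e.2 then acc
  else (PySem.Set.add acc.1 e.2, acc.2 ++ [e.2])

-- one node of the frontier expanded into (visited, next_frontier)
def pvExpand (graph : List (String × List (String × String)))
    (acc : PySem.Set String × List String) (node : String) : PySem.Set String × List String :=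
  (PySem.Dict.getD (PySem.Dict.mk graph) node []).foldl pvStepB acc

-- B's 'for dist in range(max(max_hops, 0) + 1)' loop (n = iterations left)
def pvLoopB (graph : List (String × List (String × String))) (target : String)
    (n : Nat) (dist : Int) (frontier : List String) (visited : PySem.Set String) : Option Int :=
  match n with
  | 0 => none
  | Nat.succ m =>
    if frontier.contains target then some dist
    else
      let st := frontier.foldl (pvExpand graph) (visited, ([] : List String))
      if st.2.isEmpty then none
      else pvLoopB graph target m (dist + 1) st.2 st.1

def find_shortest_distance_alt (graph : List (String × List (String × String))) (start : String)
    (target : String) (max_hops : Int) : Option Int :=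
  pvLoopB graph target (max max_hops 0 + 1).toNat 0 [start] (PySem.Set.ofList [start])

-- ===== PRECONDITION & SPEC =====
def Spec_find_shortest_distance (graph : List (String × List (String × String))) (start : String) (target : String) (max_hops : Int) (out : Option Int) : Prop := out = find_shortest_distance_alt graph start target max_hops
instance (graph : List (String × List (String × String))) (start : String) (target : String) (max_hops : Int) (out : Option Int) : Decidable (Spec_find_shortest_distance graph start target max_hops out) := by unfold Spec_find_shortest_distance; infer_instance

-- ===== CLAIM (what is proved, stated in full; the proofs are below) =====
def Claim_equal_find_shortest_distance : Prop := ∀ (graph : List (String × List (String × String))) (start : String) (target : String) (max_hops : Int), Dom_find_shortest_distance graph start target max_hops → Spec_find_shortest_distance graph start target max_hops (find_shortest_distance graph start target max_hops)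

-- ===== LEMMAS AND PROOFS =====
-- one-step unfoldings of A's loop
theorem pvLoopA_nil (graph : List (String × List (String × String))) (target : String)
    (max_hops : Int) (v : PySem.Set String) :
    pvLoopA graph target max_hops [] v = none := by
  rw [pvLoopA]

theorem pvLoopA_cons (graph : List (String × List (String × String))) (target : String)
    (max_hops : Int) (node : String) (dist : Int) (rest : List (String × Int))
    (v : PySem.Set String) :
    pvLoopA graph target max_hops ((node, dist) :: rest) v
      = if node = target then some dist
        else if max_hops ≤ dist then pvLoopA graph target max_hops rest v
        else
          let st := (PySem.Dict.getD (PySem.Dict.mk graph) node []).foldl (pvStepA dist) (v, rest)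
          pvLoopA graph target max_hops st.2 st.1 := by
  rw [pvLoopA]

-- B's inner fold only appends to its accumulator list
theorem pvFoldB_acc (es : List (String × String)) :
    ∀ (v : PySem.Set String) (acc : List String),
      es.foldl pvStepB (v, acc)
        = ((es.foldl pvStepB (v, [])).1, acc ++ (es.foldl pvStepB (v, [])).2) := by
  induction es with
  | nil => intro v acc; simp
  | cons e t ih =>
    intro v acc
    simp only [List.foldl_cons]
    by_cases h : PySem.Set.contains v e.2 = true
    · simp only [pvStepB, h, if_pos]
      exact ih v acc
    · simp only [pvStepB, h, Bool.false_eq_true, if_neg, not_false_iff]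
      rw [ih (PySem.Set.add v e.2) (acc ++ [e.2]), ih (PySem.Set.add v e.2) ([] ++ [e.2])]
      simp

-- A's inner fold is B's inner fold with the new nodes tagged by dist+1 and appended to the queue
theorem pvFoldAB (dist : Int) (es : List (String × String)) :
    ∀ (v : PySem.Set String) (q : List (String × Int)),
      es.foldl (pvStepA dist) (v, q)
        = ((es.foldl pvStepB (v, [])).1,
           q ++ ((es.foldl pvStepB (v, [])).2).map (fun s => (s, dist + 1))) := by
  induction es with
  | nil => intro v q; simp
  | cons e t ih =>
    intro v q
    simp only [List.foldl_cons]
    by_cases h : PySem.Set.contains v e.2 = true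
    · simp only [pvStepA, pvStepB, h, if_pos]
      exact ih v q
    · simp only [pvStepA, pvStepB, h, Bool.false_eq_true, if_neg, not_false_iff]
      rw [ih (PySem.Set.add v e.2) (q ++ [(e.2, dist + 1)]),
        pvFoldB_acc t (PySem.Set.add v e.2) ([] ++ [e.2])]
      simp

-- B's frontier fold only appends to its accumulator list
theorem pvExpandFold_acc (graph : List (String × List (String × String))) (l : List String) :
    ∀ (v : PySem.Set String) (acc : List String),
      l.foldl (pvExpand graph) (v, acc)
        = ((l.foldl (pvExpand graph) (v, [])).1, acc ++ (l.foldl (pvExpand graph) (v, [])).2) := by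
  induction l with
  | nil => intro v acc; simp
  | cons a t ih =>
    intro v acc
    simp only [List.foldl_cons]
    have he : ∀ ac : List String, pvExpand graph (v, ac) a
        = ((pvExpand graph (v, []) a).1, ac ++ (pvExpand graph (v, []) a).2) := by
      intro ac
      unfold pvExpand
      rw [pvFoldB_acc _ v ac]
    rw [he acc]
    rw [ih (pvExpand graph (v, []) a).1 (acc ++ (pvExpand graph (v, []) a).2),
      ih (pvExpand graph (v, []) a).1 (pvExpand graph (v, []) a).2]
    simp

-- level simulation: A's queue holding the rest of level d plus a prefix of level d+1
theorem pvLevel (graph : List (String × List (String × String))) (target : String)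
    (max_hops : Int) (d : Int) :
    ∀ (l1 l2 : List String) (v : PySem.Set String), (max_hops ≤ d → l2 = []) →
      pvLoopA graph target max_hops
          (l1.map (fun s => (s, d)) ++ l2.map (fun s => (s, d + 1))) v
        = if l1.contains target then some d
          else if max_hops ≤ d then none
          else pvLoopA graph target max_hops
              ((l2 ++ (l1.foldl (pvExpand graph) (v, [])).2).map (fun s => (s, d + 1)))
              (l1.foldl (pvExpand graph) (v, [])).1 := by
  intro l1
  induction l1 with
  | nil =>
    intro l2 v h2
    by_cases hmd : max_hops ≤ d
    · rw [h2 hmd]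
      simp [pvLoopA_nil, hmd]
    · simp [hmd]
  | cons x t ih =>
    intro l2 v h2
    by_cases hx : x = target
    · subst hx
      simp [pvLoopA_cons]
    · have hx' : (target == x) = false := by
        simp [Ne.symm hx]
      by_cases hmd : max_hops ≤ d
      · rw [h2 hmd]
        simp only [List.map_cons, List.map_nil, List.append_nil,
          pvLoopA_cons, hx, if_neg, hmd, if_pos, not_false_iff]
        have := ih [] v (fun _ => rfl)
        simp only [List.map_nil, List.append_nil] at this
        rw [this]
        have hxx : ¬ target = x := fun h => hx h.symm
        simp [hmd, hxx]
      · simp only [List.map_cons, List.cons_append, pvLoopA_cons, hx, if_neg, hmd,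
          not_false_iff]
        rw [pvFoldAB d _ v _]
        dsimp only
        have hre : (t.map (fun s => (s, d)) ++ l2.map (fun s => (s, d + 1)))
              ++ ((PySem.Dict.getD (PySem.Dict.mk graph) x []).foldl pvStepB (v, [])).2.map
                  (fun s => (s, d + 1))
            = t.map (fun s => (s, d))
              ++ (l2 ++ (pvExpand graph (v, []) x).2).map (fun s => (s, d + 1)) := by
          simp [pvExpand, List.map_append]
        rw [hre]
        rw [show (List.foldl pvStepB (v, []) (PySem.Dict.getD (PySem.Dict.mk graph) x [])).1
          = (pvExpand graph (v, []) x).1 from rfl]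
        rw [ih (l2 ++ (pvExpand graph (v, []) x).2) (pvExpand graph (v, []) x).1
          (fun h => absurd h hmd)]
        simp only [List.contains_cons, hx', Bool.false_or]
        by_cases ht : t.contains target = true
        · have htm : target ∈ t := by simpa using ht
          simp [htm]
        · simp only [ht, Bool.false_eq_true, if_neg, not_false_iff, hmd]
          have hfold : t.foldl (pvExpand graph) (pvExpand graph (v, []) x)
              = ((t.foldl (pvExpand graph) ((pvExpand graph (v, []) x).1, [])).1,
                 (pvExpand graph (v, []) x).2
                   ++ (t.foldl (pvExpand graph) ((pvExpand graph (v, []) x).1, [])).2) := by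
            rw [← pvExpandFold_acc graph t (pvExpand graph (v, []) x).1
              (pvExpand graph (v, []) x).2]
          rw [List.foldl_cons]
          rw [hfold]
          simp [List.append_assoc]

-- main simulation: processing whole levels matches B's counted loop
theorem pvMain (graph : List (String × List (String × String))) (target : String)
    (max_hops : Int) :
    ∀ (k : Nat) (d : Int) (frontier : List String) (v : PySem.Set String),
      (d < max_hops → (k : Int) = max_hops - d) → (max_hops ≤ d → k = 0) →
      pvLoopA graph target max_hops (frontier.map (fun s => (s, d))) v
        = pvLoopB graph target (k + 1) d frontier v := by
  intro k
  induction k with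
  | zero =>
    intro d frontier v h1 h2
    have hmd : max_hops ≤ d := by
      by_contra h
      have := h1 (by omega)
      omega
    have hl := pvLevel graph target max_hops d frontier [] v (fun _ => rfl)
    simp only [List.map_nil, List.append_nil] at hl
    rw [hl]
    simp [pvLoopB, hmd]
  | succ k ih =>
    intro d frontier v h1 h2
    have hdm : d < max_hops := by
      by_contra h
      have := h2 (by omega)
      omega
    have hk : (k : Int) + 1 = max_hops - d := by
      have := h1 hdm
      push_cast at this
      omega
    have hl := pvLevel graph target max_hops d frontier [] v (fun h => absurd h (by omega))
    simp only [List.map_nil, List.append_nil] at hl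
    rw [hl]
    by_cases hc : frontier.contains target = true
    · have hcm : target ∈ frontier := by simpa using hc
      simp [pvLoopB, hcm]
    · have hih := ih (d + 1) (frontier.foldl (pvExpand graph) (v, [])).2
        (frontier.foldl (pvExpand graph) (v, [])).1
        (by intro h; omega) (by intro h; omega)
      rw [show pvLoopB graph target (k + 1 + 1) d frontier v
          = if frontier.contains target = true then some d
            else if (frontier.foldl (pvExpand graph) (v, ([] : List String))).2.isEmpty then none
            else pvLoopB graph target (k + 1) (d + 1)
              (frontier.foldl (pvExpand graph) (v, ([] : List String))).2
              (frontier.foldl (pvExpand graph) (v, ([] : List String))).1 from rfl]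
      simp only [hc, Bool.false_eq_true, if_neg, not_false_iff, not_le.mpr hdm,
        List.nil_append]
      by_cases hemp : (frontier.foldl (pvExpand graph) (v, ([] : List String))).2.isEmpty = true
      · rw [List.isEmpty_iff.mp hemp]
        simp [pvLoopA_nil]
      · simp only [hemp, Bool.false_eq_true, if_neg, not_false_iff]
        exact hih

-- ===== VERDICT (by name: the statement is the Claim_ definition above) =====
theorem find_shortest_distance_spec : Claim_equal_find_shortest_distance := by
  intro graph start target max_hops _
  unfold Spec_find_shortest_distance find_shortest_distance find_shortest_distance_alt
  have h := pvMain graph target max_hops (if 0 < max_hops then max_hops.toNat else 0) 0 [start]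
    (PySem.Set.ofList [start]) (by intro h; simp [h]; omega) (by intro h; simp; omega)
  simp only [List.map] at h
  rw [show ((max max_hops 0 + 1).toNat) = (if 0 < max_hops then max_hops.toNat else 0) + 1 by
    split <;> omega]
  exact h
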